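-- pv_equiv track=rewrite | github.com/rohitsinghlab/KolossuS | kolossus/aprkh_utils/stringops.py | apply_subs
-- ===== SOURCE A (Python) =====
-- def apply_subs(s, subs, zero_based=True):
--     """
--     Apply substitution mutations to a string.
--
--     Input:
--         - s (str or Bio.Seq.Seq object): sequence to which we apply mutations.
--         - subs [list[tuple]]: each tuple is 3-tuple: (from, to, position)
--     """
--     # positions to which to apply mutation
--     if zero_based:
--         submap = {t[2]: (t[0], t[1]) for t in subs}
--     else:
--         submap = {t[2]-1: (t[0], t[1]) for t in subs}
--
--     # output variable
--     out = []
--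
--     # remember to add a try-catch for invalid subs
--     for i, c in enumerate(s):
--         a, b = submap.get(i, (c, c))
--         assert s[i] == a
--         out.append(b)
--
--     return ''.join(out)
-- ===== SOURCE B (Python) =====
-- def apply_subs(s, subs, zero_based=True):
--     # Single pass over the substitutions themselves: edit a mutable copy of s
--     # at each in-range target position (later subs at the same position win,
--     # exactly like A's dict comprehension).  No dict is built and the string
--     # is not scanned character by character.
--     off = 0 if zero_based else 1
--     out = list(s)
--     n = len(s)
--     for a, b, p in subs:
--         pos = p - off
--         if 0 <= pos < n:
--             out[pos] = b
--     return ''.join(out)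
-- ===== Notes on version B (the rewrite author's own statement) =====
-- stated objective: simpler
-- what changed: B drops the position dict entirely and makes one pass over the substitutions, writing each in-range target into a mutable list(s) buffer (later subs overwrite earlier ones, matching A's dict comprehension), instead of A's dict build plus per-character scan of s with a lookup at every index.
import Mathlib
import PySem

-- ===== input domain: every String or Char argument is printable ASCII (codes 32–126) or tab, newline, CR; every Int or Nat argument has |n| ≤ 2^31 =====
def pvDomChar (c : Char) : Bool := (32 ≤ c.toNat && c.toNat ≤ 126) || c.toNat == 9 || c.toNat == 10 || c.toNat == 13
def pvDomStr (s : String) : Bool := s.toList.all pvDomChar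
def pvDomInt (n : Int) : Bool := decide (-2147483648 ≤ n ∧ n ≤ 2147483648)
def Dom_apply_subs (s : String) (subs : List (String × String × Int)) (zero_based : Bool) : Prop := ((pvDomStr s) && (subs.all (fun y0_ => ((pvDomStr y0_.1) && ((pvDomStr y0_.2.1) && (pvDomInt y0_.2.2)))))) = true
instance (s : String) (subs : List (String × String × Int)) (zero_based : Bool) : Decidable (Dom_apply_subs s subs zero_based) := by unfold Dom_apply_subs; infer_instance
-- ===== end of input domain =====

-- B drops the position dict and makes ONE pass over the substitutions, writing each
-- in-range target into a mutable list(s) buffer (later subs overwrite earlier ones,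
-- matching A's dict comprehension), instead of A's dict build + per-character scan of s.

-- ===== PORT A =====
-- the effective position of a substitution tuple (t[2] or t[2]-1)
def effPos (zero_based : Bool) (p : Int) : Int := if zero_based then p else p - 1

-- literal port of A; the `assert s[i] == a` holds on Pre_apply_subs (A raises outside it)
def apply_subs (s : String) (subs : List (String × String × Int)) (zero_based : Bool) : String :=
  let submap : PySem.Dict Int (String × String) :=
    if zero_based then
      subs.foldl (fun d t => d.insert t.2.2 (t.1, t.2.1)) PySem.Dict.empty
    else
      subs.foldl (fun d t => d.insert (t.2.2 - 1) (t.1, t.2.1)) PySem.Dict.empty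
  let out : List String :=
    (PySem.List.enumerate s.toList).foldl
      (fun acc p =>
        let ab := submap.getD p.1 (String.ofList [p.2], String.ofList [p.2])
        acc ++ [ab.2]) []
  PySem.Str.join "" out

-- ===== PORT B =====
-- literal port of Source B: out = list(s), then one fold over subs writing each in-range
-- target position (no dict, no scan of s)
def apply_subs_alt (s : String) (subs : List (String × String × Int)) (zero_based : Bool) : String :=
  let off : Int := if zero_based then 0 else 1
  let n : Int := (s.toList.length : Int)
  let out : List String :=
    subs.foldl
      (fun acc t =>
        let pos := t.2.2 - off
        if 0 ≤ pos ∧ pos < n then acc.set pos.toNat t.2.1 else acc)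
      (s.toList.map (fun c => String.ofList [c]))
  PySem.Str.join "" out

-- ===== PRECONDITION & SPEC =====
-- Pre_ excludes exactly the inputs on which A's `assert s[i] == a` fails (AssertionError):
-- some substitution that wins the dict (no later sub at the same effective position) targets an
-- in-range position whose `from` string is not the single character of s there.
def Pre_apply_subs (s : String) (subs : List (String × String × Int)) (zero_based : Bool) : Prop :=
  ∀ j, (hj : j < subs.length) →
    (0 ≤ effPos zero_based (subs[j].2.2) ∧ effPos zero_based (subs[j].2.2) < (s.toList.length : Int)) →
    (∀ k, (hk : k < subs.length) → j < k →
      effPos zero_based (subs[k].2.2) ≠ effPos zero_based (subs[j].2.2)) →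
    subs[j].1 = String.ofList [s.toList[(effPos zero_based (subs[j].2.2)).toNat]!]
instance (s : String) (subs : List (String × String × Int)) (zero_based : Bool) : Decidable (Pre_apply_subs s subs zero_based) := by unfold Pre_apply_subs; infer_instance

def pvWitness_apply_subs : String × (List (String × String × Int)) × Bool :=
  ("abc", [("b", "xy", 1), ("c", "q", 5)], true)

def Spec_apply_subs (s : String) (subs : List (String × String × Int)) (zero_based : Bool) (out : String) : Prop := out = apply_subs_alt s subs zero_based
instance (s : String) (subs : List (String × String × Int)) (zero_based : Bool) (out : String) : Decidable (Spec_apply_subs s subs zero_based out) := by unfold Spec_apply_subs; infer_instance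

-- ===== CLAIM (what is proved, stated in full; the proofs are below) =====
def Claim_equal_apply_subs : Prop := ∀ (s : String) (subs : List (String × String × Int)) (zero_based : Bool), Dom_apply_subs s subs zero_based → Pre_apply_subs s subs zero_based → Spec_apply_subs s subs zero_based (apply_subs s subs zero_based)


-- ===== LEMMAS AND PROOFS =====

-- A's dict lookup is the LAST substitution inserted at that key
lemma get?_foldl_insert_key {α : Type} (l : List α) (key : α → Int) (val : α → String × String) (k : Int) :
    ((l.foldl (fun d t => d.insert (key t) (val t)) PySem.Dict.empty).get? k) =
    (l.reverse.find? (fun t => key t == k)).map val := by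
  induction l using List.reverseRecOn with
  | nil => simp [PySem.Dict.get?_empty]
  | append_singleton l t ih =>
    rw [List.foldl_append, List.foldl_cons, List.foldl_nil, List.reverse_append]
    simp only [List.reverse_singleton, List.singleton_append, List.find?_cons]
    by_cases h : key t = k
    · simp [h, PySem.Dict.get?_insert_self]
    · rw [PySem.Dict.get?_insert_of_ne _ _ (Ne.symm h)]
      have hb : (key t == k) = false := by simp [h]
      simp [hb, ih]

-- B's set-fold, element by element: last matching substitution wins
lemma setfold_getElem? {α : Type} (l : List α) (pos : α → Int) (val : α → String)
    (m : Nat) (L : List String) (hm : L.length = m) (n : Nat) :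
    (l.foldl (fun acc t => if 0 ≤ pos t ∧ pos t < (m : Int) then acc.set (pos t).toNat (val t) else acc) L)[n]? =
    match l.reverse.find? (fun t => pos t == (n : Int)) with
    | some t => if n < m then some (val t) else none
    | none => L[n]? := by
  induction l generalizing L with
  | nil => simp
  | cons t rest ih =>
    rw [List.foldl_cons, List.reverse_cons, List.find?_append]
    cases hfind : rest.reverse.find? (fun t => pos t == (n : Int)) with
    | some q =>
      have := ih (L := if 0 ≤ pos t ∧ pos t < (m : Int) then L.set (pos t).toNat (val t) else L)
        (by split_ifs <;> simp [hm])
      rw [this, hfind]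
      simp
    | none =>
      have := ih (L := if 0 ≤ pos t ∧ pos t < (m : Int) then L.set (pos t).toNat (val t) else L)
        (by split_ifs <;> simp [hm])
      rw [this, hfind]
      simp only [List.find?_singleton, Option.none_or]
      by_cases h : pos t = (n : Int)
      · have hbeq : (pos t == (n : Int)) = true := beq_iff_eq.mpr h
        simp only [hbeq, if_pos trivial]
        by_cases hn : n < m
        · have hguard : 0 ≤ pos t ∧ pos t < (m : Int) := by constructor <;> omega
          have hpn : (pos t).toNat = n := by omega
          rw [if_pos hguard, if_pos hn, hpn]
          simp [hm, hn]
        · have hguard : ¬ (0 ≤ pos t ∧ pos t < (m : Int)) := by omega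
          rw [if_neg hguard, if_neg hn]
          exact List.getElem?_eq_none (by omega)
      · have hbeq : (pos t == (n : Int)) = false := by simp [h]
        simp only [hbeq, Bool.false_eq_true, if_false]
        by_cases hguard : 0 ≤ pos t ∧ pos t < (m : Int)
        · rw [if_pos hguard]
          exact List.getElem?_set_ne (by omega)
        · rw [if_neg hguard]

-- the two output LISTS agree at every index
lemma out_lists_eq (s : String) (subs : List (String × String × Int)) (zero_based : Bool) :
    ((PySem.List.enumerate s.toList).foldl
      (fun acc p =>
        let ab := ((if zero_based then
            subs.foldl (fun d t => d.insert t.2.2 (t.1, t.2.1)) PySem.Dict.empty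
          else
            subs.foldl (fun d t => d.insert (t.2.2 - 1) (t.1, t.2.1)) PySem.Dict.empty) :
          PySem.Dict Int (String × String)).getD p.1 (String.ofList [p.2], String.ofList [p.2])
        acc ++ [ab.2]) []) =
    (subs.foldl
      (fun acc t =>
        if 0 ≤ t.2.2 - (if zero_based then (0:Int) else 1) ∧
            t.2.2 - (if zero_based then (0:Int) else 1) < ((s.toList.length : Int)) then
          acc.set (t.2.2 - (if zero_based then (0:Int) else 1)).toNat t.2.1
        else acc)
      (s.toList.map (fun c => String.ofList [c]))) := by
  rw [PySem.List.foldl_append_singleton_eq_map]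
  apply List.ext_getElem?
  intro n
  rw [setfold_getElem? subs (fun t => t.2.2 - (if zero_based then (0:Int) else 1)) (fun t => t.2.1)
       s.toList.length _ (by simp) n]
  have hget : ∀ k : Int,
      ((if zero_based then
          subs.foldl (fun d t => d.insert t.2.2 (t.1, t.2.1)) PySem.Dict.empty
        else
          subs.foldl (fun d t => d.insert (t.2.2 - 1) (t.1, t.2.1)) PySem.Dict.empty) :
        PySem.Dict Int (String × String)).get? k =
      (subs.reverse.find? (fun t => (t.2.2 - (if zero_based then (0:Int) else 1)) == k)).map
        (fun t => (t.1, t.2.1)) := by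
    intro k
    cases zero_based with
    | true => simpa using get?_foldl_insert_key subs (fun t => t.2.2) (fun t => (t.1, t.2.1)) k
    | false => simpa using get?_foldl_insert_key subs (fun t => t.2.2 - 1) (fun t => (t.1, t.2.1)) k
  simp only [List.nil_append, List.getElem?_map, PySem.List.getElem?_enumerate]
  by_cases hn : n < s.toList.length
  · have h1 : s.toList[n]? = some s.toList[n] := List.getElem?_eq_getElem hn
    rw [h1]
    simp only [Option.map_some]
    rw [PySem.Dict.getD_eq_get?_getD, hget]
    cases hfind : subs.reverse.find? (fun t => (t.2.2 - (if zero_based then (0:Int) else 1)) == (n : Int)) with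
    | some t => simpa [hfind] using hn
    | none => simp [hfind]
  · have h1 : s.toList[n]? = none := List.getElem?_eq_none (by omega)
    rw [h1]
    simp only [Option.map_none]
    cases hfind : subs.reverse.find? (fun t => (t.2.2 - (if zero_based then (0:Int) else 1)) == (n : Int)) with
    | some t => simpa [hfind] using Nat.le_of_not_lt hn
    | none => simp

-- ===== VERDICT (by name: the statement is the Claim_ definition above) =====
theorem apply_subs_spec : Claim_equal_apply_subs := by
  intro s subs zero_based _ _
  unfold Spec_apply_subs apply_subs apply_subs_alt
  simp only []
  rw [out_lists_eq s subs zero_based]
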